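-- pv_equiv track=rewrite | github.com/IJS1016/ps_study | 정선/python/codetree/사다리타기.py | convert_info
-- ===== SOURCE A (Python) =====
-- max_b = 15
--
-- def convert_info(tmp_infos) :
--     infos = []
--     # infos[y] = [a1, a2, a3]
--     for i in range(1, max_b+1) :
--         tmp = []
--         for ti in tmp_infos :
--             if ti[1] == i :
--                 tmp.append(ti[0])
--         infos.append(tmp)
--     return infos
-- ===== SOURCE B (Python) =====
-- max_b = 15
--
-- def convert_info(tmp_infos):
--     # One pass: route each entry straight to its bucket (same output as the 15x rescan).
--     infos = [[] for _ in range(max_b)]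
--     for ti in tmp_infos:
--         b = ti[1]
--         if 1 <= b <= max_b:
--             infos[b - 1].append(ti[0])
--     return infos
-- ===== Notes on version B (the rewrite author's own statement) =====
-- stated objective: faster
-- what changed: Replaces the outer 1..15 loop that rescans the whole input per bucket with a single pass that routes each entry directly to bucket b-1 (dropping out-of-range b), preserving within-bucket order.
import Mathlib
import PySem

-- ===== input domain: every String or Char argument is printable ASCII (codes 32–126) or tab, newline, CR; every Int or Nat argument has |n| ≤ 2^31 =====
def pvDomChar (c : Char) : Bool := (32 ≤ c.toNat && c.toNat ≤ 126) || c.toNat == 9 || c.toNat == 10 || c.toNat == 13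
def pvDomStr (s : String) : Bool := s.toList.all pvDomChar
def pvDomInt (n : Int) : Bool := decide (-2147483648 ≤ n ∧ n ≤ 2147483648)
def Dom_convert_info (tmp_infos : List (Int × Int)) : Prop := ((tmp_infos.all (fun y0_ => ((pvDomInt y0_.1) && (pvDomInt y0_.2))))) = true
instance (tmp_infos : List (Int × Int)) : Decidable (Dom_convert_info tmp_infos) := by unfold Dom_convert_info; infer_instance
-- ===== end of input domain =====

-- B replaces A's 15 full rescans (one per bucket) with a single pass routing each entry to its bucket; same output.


-- ===== PORT A =====
-- for i in range(1, 16): tmp = []; for ti: if ti[1] == i: tmp.append(ti[0]); infos.append(tmp)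
def convert_info (tmp_infos : List (Int × Int)) : List (List Int) :=
  (PySem.List.pyRange 1 (15 + 1) 1).foldl
    (fun infos i =>
      infos ++ [tmp_infos.foldl (fun tmp ti => if ti.2 = i then tmp ++ [ti.1] else tmp) []])
    []

-- ===== PORT B =====
-- loop body of B: route ti to bucket ti[1]-1 when the bucket exists
def convert_info_altStep (infos : List (List Int)) (ti : Int × Int) : List (List Int) :=
  if 1 ≤ ti.2 ∧ ti.2 ≤ 15 then
    infos.set (ti.2 - 1).toNat (infos.getD (ti.2 - 1).toNat [] ++ [ti.1])
  else infos

def convert_info_alt (tmp_infos : List (Int × Int)) : List (List Int) :=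
  tmp_infos.foldl convert_info_altStep (List.replicate 15 [])

-- ===== PRECONDITION & SPEC =====
def Spec_convert_info (tmp_infos : List (Int × Int)) (out : List (List Int)) : Prop := out = convert_info_alt tmp_infos
instance (tmp_infos : List (Int × Int)) (out : List (List Int)) : Decidable (Spec_convert_info tmp_infos out) := by unfold Spec_convert_info; infer_instance

-- ===== CLAIM (what is proved, stated in full; the proofs are below) =====
def Claim_equal_convert_info : Prop := ∀ (tmp_infos : List (Int × Int)), Dom_convert_info tmp_infos → Spec_convert_info tmp_infos (convert_info tmp_infos)

-- ===== LEMMAS AND PROOFS =====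

-- the entries landing in bucket i, in input order
def pvBucket (l : List (Int × Int)) (i : Int) : List Int :=
  (l.filter (fun ti => ti.2 == i)).map Prod.fst

theorem pvBucket_cons (ti : Int × Int) (l : List (Int × Int)) (i : Int) :
    pvBucket (ti :: l) i = (if ti.2 = i then [ti.1] else []) ++ pvBucket l i := by
  by_cases h : ti.2 = i <;> simp [pvBucket, h]

theorem innerA (l : List (Int × Int)) (i : Int) (acc : List Int) :
    l.foldl (fun tmp ti => if ti.2 = i then tmp ++ [ti.1] else tmp) acc = acc ++ pvBucket l i := by
  induction l generalizing acc with
  | nil => simp [pvBucket]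
  | cons ti l ih =>
      by_cases h : ti.2 = i <;>
        simp [List.foldl, h, ih, pvBucket_cons]

theorem outerA (l : List (Int × Int)) (r : List Int) (acc : List (List Int)) :
    r.foldl
      (fun infos i =>
        infos ++ [l.foldl (fun tmp ti => if ti.2 = i then tmp ++ [ti.1] else tmp) []])
      acc = acc ++ r.map (fun i => pvBucket l i) := by
  induction r generalizing acc with
  | nil => simp
  | cons i r ih =>
      rw [List.foldl_cons, ih]
      simp [innerA]

theorem rangeLit : PySem.List.pyRange 1 (15 + 1) 1 = [1,2,3,4,5,6,7,8,9,10,11,12,13,14,15] := by decide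

theorem A_eq (l : List (Int × Int)) :
    convert_info l =
      [pvBucket l 1, pvBucket l 2, pvBucket l 3, pvBucket l 4, pvBucket l 5,
       pvBucket l 6, pvBucket l 7, pvBucket l 8, pvBucket l 9, pvBucket l 10,
       pvBucket l 11, pvBucket l 12, pvBucket l 13, pvBucket l 14, pvBucket l 15] := by
  rw [convert_info, outerA, rangeLit]
  simp

theorem lenB (l : List (Int × Int)) (init : List (List Int)) :
    (l.foldl convert_info_altStep init).length = init.length := by
  induction l generalizing init with
  | nil => rfl
  | cons ti l ih =>
      rw [List.foldl_cons, ih]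
      unfold convert_info_altStep
      split <;> simp

theorem getB (l : List (Int × Int)) (init : List (List Int)) (h15 : init.length = 15)
    (j : ℕ) (hj : j < 15) :
    (l.foldl convert_info_altStep init).getD j [] = init.getD j [] ++ pvBucket l ((j : Int) + 1) := by
  induction l generalizing init with
  | nil => simp [pvBucket]
  | cons ti l ih =>
      rw [List.foldl_cons, pvBucket_cons]
      by_cases hg : 1 ≤ ti.2 ∧ ti.2 ≤ 15
      · have hlen : (convert_info_altStep init ti).length = 15 := by
          unfold convert_info_altStep; split <;> simp [h15]
        rw [ih _ hlen]
        unfold convert_info_altStep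
        rw [if_pos hg]
        by_cases he : ti.2 = (j : Int) + 1
        · have hidx : (ti.2 - 1).toNat = j := by omega
          have hjlen : j < init.length := by omega
          rw [if_pos he, hidx]
          simp [List.getD, hjlen]
        · have hidx : ti.2.toNat - 1 ≠ j := by omega
          rw [if_neg he]
          simp [List.getD, List.getElem?_set_ne hidx]
      · have he : ¬ ti.2 = (j : Int) + 1 := by omega
        rw [ih _ (by unfold convert_info_altStep; rw [if_neg hg]; exact h15), if_neg he]
        unfold convert_info_altStep
        rw [if_neg hg]
        simp

theorem B_eq (l : List (Int × Int)) :
    convert_info_alt l =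
      [pvBucket l 1, pvBucket l 2, pvBucket l 3, pvBucket l 4, pvBucket l 5,
       pvBucket l 6, pvBucket l 7, pvBucket l 8, pvBucket l 9, pvBucket l 10,
       pvBucket l 11, pvBucket l 12, pvBucket l 13, pvBucket l 14, pvBucket l 15] := by
  have hlen : (convert_info_alt l).length = 15 := by
    unfold convert_info_alt; rw [lenB]; simp
  apply List.ext_getElem
  · simp [hlen]
  · intro j h1 h2
    have hj : j < 15 := by omega
    have hget : (convert_info_alt l)[j] = (convert_info_alt l).getD j [] := by
      rw [List.getD_eq_getElem _ _ h1]
    rw [hget]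
    unfold convert_info_alt
    rw [getB l _ (by simp) j hj]
    interval_cases j <;> simp

-- ===== VERDICT (by name: the statement is the Claim_ definition above) =====
theorem convert_info_spec : Claim_equal_convert_info := by
  intro l _
  unfold Spec_convert_info
  rw [A_eq, B_eq]
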